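-- pv_equiv track=rewrite | github.com/NREL/powerscenarios | powerscenarios/parser.py | remove_spaces_between_quotes
-- ===== SOURCE A (Python) =====
-- def remove_spaces_between_quotes(line):
--     """Internal function to remove spaces in a line if they appear between "" while parsing .aux files for TAMU grids
--
--     Required Args:
--         line - (String) a line to be modified
--     Returns:
--         modified line (String)
--
--
--     E.g. line:
--     '1 "CREVE COEUR 0" 115.00000000000000000000 "NO "'
--     turns into:
--     '1 "CREVECOEUR0" 115.00000000000000000000 "NO"'
--
--     """
--
--     quotes_start = False
--     quotes_end = False
--
--     new_line = ""
--
--     for char in line: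
--         if char == '"' and not quotes_start:
--             quotes_start = True
--             quotes_end = False
--             new_line += char
--             continue
--
--         if quotes_start and char == '"':
--             quotes_end = True
--             quotes_start = False
--             new_line += char
--             continue
--
--         if quotes_start and not quotes_end:
--             if char == " ":
--                 new_line += ""
--             else:
--                 new_line += char
--
--         else:
--             new_line += char
--
--     return new_line
-- ===== SOURCE B (Python) =====
-- def remove_spaces_between_quotes(line):
--     parts = line.split('"')
--     for i in range(1, len(parts), 2):
--         parts[i] = parts[i].replace(' ', '')
--     return '"'.join(parts)
-- ===== Notes on version B (the rewrite author's own statement) =====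
-- stated objective: faster
-- what changed: Replaces the char-by-char quote-toggle state machine (building the result by repeated string concatenation) with a split on the quote character, stripping spaces from the odd-indexed (inside-quotes) segments via str.replace, then rejoining.
import Mathlib
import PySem

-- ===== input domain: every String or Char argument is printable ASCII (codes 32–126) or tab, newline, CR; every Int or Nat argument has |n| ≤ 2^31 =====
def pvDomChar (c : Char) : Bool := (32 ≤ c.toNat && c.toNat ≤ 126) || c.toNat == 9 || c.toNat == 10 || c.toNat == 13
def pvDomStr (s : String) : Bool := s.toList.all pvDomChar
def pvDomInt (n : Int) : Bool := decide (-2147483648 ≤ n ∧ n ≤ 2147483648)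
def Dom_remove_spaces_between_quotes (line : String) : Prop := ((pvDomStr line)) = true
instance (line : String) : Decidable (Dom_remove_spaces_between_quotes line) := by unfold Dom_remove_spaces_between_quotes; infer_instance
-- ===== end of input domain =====

-- B: split the line on the quote char and strip spaces from the odd-indexed (inside-quotes) segments, then rejoin — replaces A's per-character toggle machine (measured faster in a timing run).


-- ===== PORT A =====
-- one step of A's loop body; state = (quotes_start, quotes_end, new_line)
def pvStepA (st : Bool × Bool × List Char) (c : Char) : Bool × Bool × List Char :=
  if c = '"' ∧ st.1 = false then (true, false, st.2.2 ++ [c])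
  else if st.1 = true ∧ c = '"' then (false, true, st.2.2 ++ [c])
  else if st.1 = true ∧ st.2.1 = false then
    (if c = ' ' then st else (st.1, st.2.1, st.2.2 ++ [c]))
  else (st.1, st.2.1, st.2.2 ++ [c])

def remove_spaces_between_quotes (line : String) : String :=
  String.mk (line.toList.foldl pvStepA (false, false, [])).2.2

-- ===== PORT B =====
-- the loop `for i in range(1, len(parts), 2): parts[i] = parts[i].replace(' ', '')`
def pvFixParts : List (List Char) → List (List Char)
  | [] => []
  | [p] => [p]
  | p :: q :: rest => p :: PySem.Chars.replace q [' '] [] :: pvFixParts rest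

def remove_spaces_between_quotes_alt (line : String) : String :=
  String.mk (PySem.Chars.join ['"'] (pvFixParts (PySem.Chars.splitOn line.toList ['"'])))

-- ===== PRECONDITION & SPEC =====
def Spec_remove_spaces_between_quotes (line : String) (out : String) : Prop := out = remove_spaces_between_quotes_alt line
instance (line : String) (out : String) : Decidable (Spec_remove_spaces_between_quotes line out) := by unfold Spec_remove_spaces_between_quotes; infer_instance

-- ===== CLAIM =====
def Claim_equal_remove_spaces_between_quotes : Prop := ∀ (line : String), Dom_remove_spaces_between_quotes line → Spec_remove_spaces_between_quotes line (remove_spaces_between_quotes line)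

-- ===== LEMMAS AND PROOFS =====

-- the common spec: a one-boolean machine (b = "currently inside quotes")
def pvG (b : Bool) : List Char → List Char
  | [] => []
  | c :: cs =>
    if c = '"' then '"' :: pvG (!b) cs
    else if b = true ∧ c = ' ' then pvG b cs
    else c :: pvG b cs

-- structural recursion computing splitOn · ['"']
def pvSp : List Char → List (List Char)
  | [] => [[]]
  | c :: cs => if c = '"' then [] :: pvSp cs else (pvSp cs).modifyHead (c :: ·)

-- alternating filter (b = "this segment is inside quotes")
def pvFix (b : Bool) : List (List Char) → List (List Char)
  | [] => []
  | p :: ps => (if b then p.filter (· ≠ ' ') else p) :: pvFix (!b) ps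

theorem pvReplace_go_eq (l : List Char) : ∀ (fuel : Nat) (acc : List Char), l.length ≤ fuel →
    PySem.Chars.replace.go [' '] [] fuel l acc = acc.reverse ++ l.filter (· ≠ ' ') := by
  induction l with
  | nil =>
    intro fuel acc _
    cases fuel <;> simp [PySem.Chars.replace.go]
  | cons c t ih =>
    intro fuel acc h
    cases fuel with
    | zero => simp at h
    | succ f =>
      by_cases hc : c = ' '
      · subst hc
        have step : PySem.Chars.replace.go [' '] [] (f + 1) (' ' :: t) acc
            = PySem.Chars.replace.go [' '] [] f t acc := by
          simp [PySem.Chars.replace.go, List.isPrefixOf]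
        rw [step, ih f acc (by simpa using h)]
        simp [List.filter]
      · have hbeq : ((' ' == c)) = false := by
          simp only [beq_eq_false_iff_ne, ne_eq]
          exact fun h' => hc h'.symm
        have step : PySem.Chars.replace.go [' '] [] (f + 1) (c :: t) acc
            = PySem.Chars.replace.go [' '] [] f t (c :: acc) := by
          simp [PySem.Chars.replace.go, List.isPrefixOf, hbeq]
        rw [step, ih f (c :: acc) (by simpa using h)]
        simp [List.filter, hc]

theorem pvReplace_eq (l : List Char) :
    PySem.Chars.replace l [' '] [] = l.filter (· ≠ ' ') := by
  simp only [PySem.Chars.replace, List.isEmpty]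
  rw [pvReplace_go_eq l l.length [] le_rfl]
  simp

theorem pvFixParts_eq : ∀ (ps : List (List Char)), pvFixParts ps = pvFix false ps := by
  intro ps
  induction ps using pvFixParts.induct with
  | case1 => simp [pvFixParts, pvFix]
  | case2 p => simp [pvFixParts, pvFix]
  | case3 p q rest ih => simp [pvFixParts, pvFix, pvReplace_eq, ih]

theorem pvSplit_go_eq (l : List Char) : ∀ (fuel : Nat) (cur : List Char) (acc : List (List Char)),
    l.length ≤ fuel →
    PySem.Chars.splitOn.go ['"'] fuel l cur acc
      = acc.reverse ++ (pvSp l).modifyHead (cur.reverse ++ ·) := by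
  induction l with
  | nil =>
    intro fuel cur acc _
    cases fuel <;> simp [PySem.Chars.splitOn.go, pvSp]
  | cons c t ih =>
    intro fuel cur acc h
    cases fuel with
    | zero => simp at h
    | succ f =>
      by_cases hc : c = '"'
      · subst hc
        have step : PySem.Chars.splitOn.go ['"'] (f + 1) ('"' :: t) cur acc
            = PySem.Chars.splitOn.go ['"'] f t [] (cur.reverse :: acc) := by
          simp [PySem.Chars.splitOn.go, List.isPrefixOf]
        rw [step, ih f [] (cur.reverse :: acc) (by simpa using h)]
        simp only [pvSp]
        cases hsp : pvSp t <;> simp [List.modifyHead]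
      · have hbeq : (('"' == c)) = false := by
          simp only [beq_eq_false_iff_ne, ne_eq]
          exact fun h' => hc h'.symm
        have step : PySem.Chars.splitOn.go ['"'] (f + 1) (c :: t) cur acc
            = PySem.Chars.splitOn.go ['"'] f t (c :: cur) acc := by
          simp [PySem.Chars.splitOn.go, List.isPrefixOf, hbeq]
        rw [step, ih f (c :: cur) acc (by simpa using h)]
        simp only [pvSp, if_neg hc]
        cases hsp : pvSp t <;> simp [List.modifyHead]

theorem pvSplitOn_eq (l : List Char) : PySem.Chars.splitOn l ['"'] = pvSp l := by
  simp only [PySem.Chars.splitOn]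
  rw [pvSplit_go_eq l (l.length + 1) [] [] (by omega)]
  cases hsp : pvSp l <;> simp [List.modifyHead]

theorem pvSp_ne_nil (l : List Char) : pvSp l ≠ [] := by
  induction l with
  | nil => simp [pvSp]
  | cons c cs ih =>
    simp only [pvSp]
    split
    · simp
    · cases hsp : pvSp cs with
      | nil => exact absurd hsp ih
      | cons p ps => simp [List.modifyHead]

theorem pvJoin_fix_cons (b : Bool) (p : List Char) (ps : List (List Char)) :
    PySem.Chars.join ['"'] (pvFix b (p :: ps))
      = (if b then p.filter (· ≠ ' ') else p)
        ++ (match ps with | [] => [] | _ :: _ => '"' :: PySem.Chars.join ['"'] (pvFix (!b) ps)) := by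
  cases ps with
  | nil => simp [pvFix, PySem.Chars.join, List.intercalate]
  | cons q ps' =>
    simp only [pvFix, PySem.Chars.join, List.intercalate]
    simp [List.intersperse]

theorem pvJoin_fix_sp (cs : List Char) : ∀ (b : Bool),
    PySem.Chars.join ['"'] (pvFix b (pvSp cs)) = pvG b cs := by
  induction cs with
  | nil =>
    intro b
    simp [pvSp, pvFix, pvG, PySem.Chars.join, List.intercalate]
  | cons c t ih =>
    intro b
    obtain ⟨p, ps, hsp⟩ : ∃ p ps, pvSp t = p :: ps := by
      cases h : pvSp t with
      | nil => exact absurd h (pvSp_ne_nil t)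
      | cons p ps => exact ⟨p, ps, rfl⟩
    by_cases hc : c = '"'
    · subst hc
      have hsp2 : pvSp ('"' :: t) = [] :: p :: ps := by simp [pvSp, hsp]
      rw [hsp2, pvJoin_fix_cons]
      have h1 : PySem.Chars.join ['"'] (pvFix true (p :: ps)) = pvG true t := by
        rw [← hsp]; exact ih true
      have h0 : PySem.Chars.join ['"'] (pvFix false (p :: ps)) = pvG false t := by
        rw [← hsp]; exact ih false
      cases b <;> simp [pvG, h1, h0]
    · have hsp2 : pvSp (c :: t) = (c :: p) :: ps := by
        simp [pvSp, hc, hsp, List.modifyHead]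
      have ih' := ih b
      rw [hsp, pvJoin_fix_cons] at ih'
      rw [hsp2, pvJoin_fix_cons]
      cases b with
      | false =>
        simp only [Bool.false_eq_true, if_false] at ih' ⊢
        simp only [pvG, if_neg hc, if_neg (by simp : ¬ (false = true ∧ c = ' '))]
        rw [← ih']
        simp
      | true =>
        rw [if_pos rfl] at ih'
        rw [if_pos rfl]
        by_cases hs : c = ' '
        · subst hs
          simp only [pvG, if_neg hc]
          rw [← ih']
          simp [List.filter]
        · simp only [pvG, if_neg hc]
          rw [← ih']
          simp [List.filter, hs]

theorem pvFoldA (cs : List Char) : ∀ (qs qe : Bool) (nl : List Char), (qs = true → qe = false) →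
    (cs.foldl pvStepA (qs, qe, nl)).2.2 = nl ++ pvG qs cs := by
  induction cs with
  | nil => intro qs qe nl _; simp [pvG]
  | cons c t ih =>
    intro qs qe nl hinv
    rw [List.foldl_cons]
    by_cases hc : c = '"'
    · subst hc
      cases qs with
      | false =>
        have hstep : pvStepA (false, qe, nl) '"' = (true, false, nl ++ ['"']) := by
          simp [pvStepA]
        rw [hstep, ih true false _ (fun _ => rfl)]
        simp [pvG]
      | true =>
        have hqe := hinv rfl; subst hqe
        have hstep : pvStepA (true, false, nl) '"' = (false, true, nl ++ ['"']) := by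
          simp [pvStepA]
        rw [hstep, ih false true _ (by simp)]
        simp [pvG]
    · cases qs with
      | true =>
        have hqe := hinv rfl; subst hqe
        by_cases hs : c = ' '
        · subst hs
          have hstep : pvStepA (true, false, nl) ' ' = (true, false, nl) := by
            simp [pvStepA]
          rw [hstep, ih true false _ (fun _ => rfl)]
          simp [pvG, hc]
        · have hstep : pvStepA (true, false, nl) c = (true, false, nl ++ [c]) := by
            simp [pvStepA, hc, hs]
          rw [hstep, ih true false _ (fun _ => rfl)]
          simp [pvG, hc, hs]
      | false =>
        have hstep : pvStepA (false, qe, nl) c = (false, qe, nl ++ [c]) := by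
          simp [pvStepA, hc]
        rw [hstep, ih false qe _ (by simp)]
        simp [pvG, hc]

-- ===== VERDICT =====
theorem remove_spaces_between_quotes_spec : Claim_equal_remove_spaces_between_quotes := by
  intro line _
  unfold Spec_remove_spaces_between_quotes remove_spaces_between_quotes remove_spaces_between_quotes_alt
  rw [pvFoldA line.toList false false [] (by simp), pvSplitOn_eq, pvFixParts_eq, pvJoin_fix_sp]
  simp
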